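-- pv_equiv track=rewrite | github.com/michael1999wang/AutotraderAnalyzer | api.py | processingPage
-- ===== SOURCE A (Python) =====
-- def processingPage(html):
--     nextMileage = False
--     nextTitle = False
--     mileage = []
--     price = []
--     year = []
--     title = []
--
--     for line in html.splitlines():
--         if nextMileage:
--             nextMileage = False
--             mileage.append(line.split(" ")[-2].replace(",", ""))
--         if nextTitle:
--             nextTitle = False
--             title.append(line.strip(" "))
--             year.append(line.strip(" ")[:4])
--         if line.find("<div class=\"kms\">") > 0:
--             nextMileage = True
--         if line.find("<span itemprop=\"itemOffered\">") > 0 or line.find("<span class=\"result-title\">") > 0: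
--             nextTitle = True
--         if line.find("<span class=\"price-amount\">") > 0:
--             price.append(line.strip(" ")[28: -7].replace(",", ""))
--
--     return mileage, price, year, title
-- ===== SOURCE B (Python) =====
-- def processingPage(html):
--     lines = html.splitlines()
--     pairs = list(zip([""] + lines, lines))
--     mileage = [ln.split(" ")[-2].replace(",", "")
--                for prev, ln in pairs if prev.find('<div class="kms">') > 0]
--     price = [ln.strip(" ")[28:-7].replace(",", "")
--              for ln in lines if ln.find('<span class="price-amount">') > 0]
--     title_pairs = [pr for pr in pairs
--                    if pr[0].find('<span itemprop="itemOffered">') > 0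
--                    or pr[0].find('<span class="result-title">') > 0]
--     year = [ln.strip(" ")[:4] for _, ln in title_pairs]
--     title = [ln.strip(" ") for _, ln in title_pairs]
--     return mileage, price, year, title
-- ===== Notes on version B (the rewrite author's own statement) =====
-- stated objective: simpler
-- what changed: Replaces the stateful single pass with two carry-over boolean flags by flag-free declarative comprehensions over (previous-line, line) pairs from zip([""]+lines, lines): each of the four result lists is built independently from the lines whose predecessor (or the line itself, for price) carries the marker.
import Mathlib
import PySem

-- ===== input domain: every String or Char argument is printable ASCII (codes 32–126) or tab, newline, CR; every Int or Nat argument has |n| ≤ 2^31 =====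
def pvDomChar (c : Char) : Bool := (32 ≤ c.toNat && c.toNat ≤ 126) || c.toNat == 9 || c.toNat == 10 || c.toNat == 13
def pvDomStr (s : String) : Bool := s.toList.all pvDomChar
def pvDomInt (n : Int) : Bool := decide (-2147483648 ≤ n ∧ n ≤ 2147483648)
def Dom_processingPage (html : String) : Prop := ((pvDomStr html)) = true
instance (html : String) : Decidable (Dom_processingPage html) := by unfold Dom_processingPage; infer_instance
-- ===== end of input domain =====

-- B replaces A's single pass with two carry-over flags by flag-free comprehensions
-- over (previous line, line) pairs; objective: simpler. Equal wherever A returns.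


-- shared value/marker helpers: the literal Python expressions both programs contain
def pvKms (line : String) : Bool := PySem.Str.find line "<div class=\"kms\">" > 0
def pvTit (line : String) : Bool :=
  PySem.Str.find line "<span itemprop=\"itemOffered\">" > 0 ||
  PySem.Str.find line "<span class=\"result-title\">" > 0
def pvPriceMark (line : String) : Bool := PySem.Str.find line "<span class=\"price-amount\">" > 0
-- line.split(" ")[-2].replace(",", "")  (pyGetD: total form of the [-2] index, in range under Pre_)
def pvMileVal (line : String) : String :=
  PySem.Str.replace (PySem.List.pyGetD ((PySem.Str.split? line " ").getD []) (-2) "") "," ""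
-- line.strip(" ")
def pvTitleVal (line : String) : String := PySem.Str.stripChars line " "
-- line.strip(" ")[:4]
def pvYearVal (line : String) : String :=
  PySem.Str.slice (PySem.Str.stripChars line " ") none (some 4)
-- line.strip(" ")[28:-7].replace(",", "")
def pvPriceVal (line : String) : String :=
  PySem.Str.replace (PySem.Str.slice (PySem.Str.stripChars line " ") (some 28) (some (-7))) "," ""

-- ===== PORT A =====  (stateful loop: two flags carried from one line to the next)
def pvStepA (st : Bool × Bool × List String × List String × List String × List String)
    (line : String) : Bool × Bool × List String × List String × List String × List String :=
  let (nm, nt, mileage, price, year, title) := st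
  let (nm, mileage) := if nm then (false, mileage ++ [pvMileVal line]) else (nm, mileage)
  let (nt, title, year) := if nt then (false, title ++ [pvTitleVal line], year ++ [pvYearVal line])
                           else (nt, title, year)
  let nm := if pvKms line then true else nm
  let nt := if pvTit line then true else nt
  let price := if pvPriceMark line then price ++ [pvPriceVal line] else price
  (nm, nt, mileage, price, year, title)

def processingPage (html : String) : List String × List String × List String × List String :=
  let r := (PySem.Str.splitlines html).foldl pvStepA (false, false, [], [], [], [])
  (r.2.2.1, r.2.2.2.1, r.2.2.2.2.1, r.2.2.2.2.2)

-- ===== PORT B =====  (flag-free: comprehensions over (previous line, line) pairs)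
def processingPage_alt (html : String) : List String × List String × List String × List String :=
  let lines := PySem.Str.splitlines html
  let pairs := ("" :: lines).zip lines
  let mileage := pairs.filterMap (fun pr => if pvKms pr.1 then some (pvMileVal pr.2) else none)
  let price := lines.filterMap (fun ln => if pvPriceMark ln then some (pvPriceVal ln) else none)
  let titlePairs := pairs.filter (fun pr => pvTit pr.1)
  let year := titlePairs.map (fun pr => pvYearVal pr.2)
  let title := titlePairs.map (fun pr => pvTitleVal pr.2)
  (mileage, price, year, title)

-- ===== PRECONDITION & SPEC =====
-- Pre_ excludes exactly the inputs where A raises IndexError: a line directly after a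
-- kms-marker line that contains no space (split(" ")[-2] then indexes a 1-element list).
def Pre_processingPage (html : String) : Prop :=
  ∀ pr ∈ ("" :: PySem.Str.splitlines html).zip (PySem.Str.splitlines html),
    PySem.Str.find pr.1 "<div class=\"kms\">" > 0 → 2 ≤ ((PySem.Str.split? pr.2 " ").getD []).length
instance (html : String) : Decidable (Pre_processingPage html) := by unfold Pre_processingPage; infer_instance
def pvWitness_processingPage : String := " <div class=\"kms\">\n 120,000 kms "
def Spec_processingPage (html : String) (out : List String × List String × List String × List String) : Prop := out = processingPage_alt html
instance (html : String) (out : List String × List String × List String × List String) : Decidable (Spec_processingPage html out) := by unfold Spec_processingPage; infer_instance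

-- ===== CLAIM (what is proved, stated in full; the proofs are below) =====
def Claim_equal_processingPage : Prop := ∀ (html : String), Dom_processingPage html → Pre_processingPage html → Spec_processingPage html (processingPage html)

-- ===== LEMMAS AND PROOFS =====

-- A's loop, characterised: with the flags that line p sets, the fold from arbitrary
-- accumulators appends exactly B's four comprehensions over ((p :: lines).zip lines).
theorem pvFoldA_eq (lines : List String) : ∀ (p : String) (m pr y t : List String),
    (lines.foldl pvStepA (pvKms p, pvTit p, m, pr, y, t)).2.2 =
      (m ++ (((p :: lines).zip lines).filterMap
              (fun q => if pvKms q.1 then some (pvMileVal q.2) else none)),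
       pr ++ (lines.filterMap (fun ln => if pvPriceMark ln then some (pvPriceVal ln) else none)),
       y ++ ((((p :: lines).zip lines).filter (fun q => pvTit q.1)).map (fun q => pvYearVal q.2)),
       t ++ ((((p :: lines).zip lines).filter (fun q => pvTit q.1)).map (fun q => pvTitleVal q.2))) := by
  induction lines with
  | nil => intro p m pr y t; simp
  | cons l ls ih =>
    intro p m pr y t
    have hstep : pvStepA (pvKms p, pvTit p, m, pr, y, t) l =
        (pvKms l, pvTit l,
         (if pvKms p then m ++ [pvMileVal l] else m),
         (if pvPriceMark l then pr ++ [pvPriceVal l] else pr),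
         (if pvTit p then y ++ [pvYearVal l] else y),
         (if pvTit p then t ++ [pvTitleVal l] else t)) := by
      simp only [pvStepA]
      by_cases h1 : pvKms p <;> by_cases h2 : pvTit p <;> simp [h1, h2]
    rw [List.foldl_cons, hstep, ih l]
    by_cases h1 : pvKms p <;> by_cases h2 : pvTit p <;> by_cases h3 : pvPriceMark l <;>
      simp [h1, h2, h3]

theorem pvNoMark_empty : pvKms "" = false ∧ pvTit "" = false := by decide

-- ===== VERDICT (by name: the statement is the Claim_ definition above) =====
theorem processingPage_spec : Claim_equal_processingPage := by
  intro html _ _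
  unfold Spec_processingPage processingPage processingPage_alt
  have h := pvFoldA_eq (PySem.Str.splitlines html) "" [] [] [] []
  rw [pvNoMark_empty.1, pvNoMark_empty.2] at h
  simp only [h, List.nil_append]
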